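-- pv_equiv track=rewrite | github.com/Craackmouse/secondary_struct_prediction | lambda_setup/prepare_inputs.py | expand_entries
-- ===== SOURCE A (Python) =====
-- def expand_entries(entries: list[tuple[str, str, int, str]]) -> tuple[list, list, list]:
--     """
--     Expand FASTA entries to individual chains with Boltz chain IDs.
--
--     RNA chains come first (A, B, C, …), then protein, then DNA.
--     This ordering ensures the Boltz output chains A, B, … map directly to
--     the RNA residues in chain_map.json.
--
--     Returns:
--         rna_chains:     [(boltz_chain_id, seq), …]
--         protein_chains: [(boltz_chain_id, seq), …]
--         dna_chains:     [(boltz_chain_id, seq), …]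
--     """
--     alphabet = "ABCDEFGHIJKLMNOPQRSTUVWXYZabcdefghijklmnopqrstuvwxyz"
--
--     rna_entries = [(h, s, n) for h, s, n, t in entries if t == "rna"]
--     prot_entries = [(h, s, n) for h, s, n, t in entries if t == "protein"]
--     dna_entries = [(h, s, n) for h, s, n, t in entries if t == "dna"]
--
--     rna_chains, protein_chains, dna_chains = [], [], []
--     idx = 0
--
--     for _, seq, n in rna_entries:
--         for _ in range(n):
--             rna_chains.append((alphabet[idx], seq))
--             idx += 1
--
--     for _, seq, n in prot_entries:
--         for _ in range(n):
--             protein_chains.append((alphabet[idx], seq))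
--             idx += 1
--
--     for _, seq, n in dna_entries:
--         for _ in range(n):
--             dna_chains.append((alphabet[idx], seq))
--             idx += 1
--
--     return rna_chains, protein_chains, dna_chains
-- ===== SOURCE B (Python) =====
-- def expand_entries(entries: list[tuple[str, str, int, str]]) -> tuple[list, list, list]:
--     """Expand each type's sequences first, then assign chain IDs by arithmetic
--     offsets into the alphabet (zip against alphabet slices) -- no threaded
--     index counter at all."""
--     alphabet = "ABCDEFGHIJKLMNOPQRSTUVWXYZabcdefghijklmnopqrstuvwxyz"
--
--     def expanded(kind):
--         return [s for _, s, n, t in entries if t == kind for _ in range(n)]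
--
--     rna, prot, dna = expanded("rna"), expanded("protein"), expanded("dna")
--     r, p = len(rna), len(prot)
--     return (list(zip(alphabet, rna)),
--             list(zip(alphabet[r:], prot)),
--             list(zip(alphabet[r + p:], dna)))
-- ===== Notes on version B (the rewrite author's own statement) =====
-- stated objective: alternative
-- what changed: Drops the shared mutable chain-index counter entirely: each type's sequence list is expanded on its own, and chain IDs are attached by zipping against alphabet slices at arithmetically computed offsets (len(rna), len(rna)+len(prot)); Pre_ excludes >52 total chains, where A raises IndexError and zip would truncate.
import Mathlib
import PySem

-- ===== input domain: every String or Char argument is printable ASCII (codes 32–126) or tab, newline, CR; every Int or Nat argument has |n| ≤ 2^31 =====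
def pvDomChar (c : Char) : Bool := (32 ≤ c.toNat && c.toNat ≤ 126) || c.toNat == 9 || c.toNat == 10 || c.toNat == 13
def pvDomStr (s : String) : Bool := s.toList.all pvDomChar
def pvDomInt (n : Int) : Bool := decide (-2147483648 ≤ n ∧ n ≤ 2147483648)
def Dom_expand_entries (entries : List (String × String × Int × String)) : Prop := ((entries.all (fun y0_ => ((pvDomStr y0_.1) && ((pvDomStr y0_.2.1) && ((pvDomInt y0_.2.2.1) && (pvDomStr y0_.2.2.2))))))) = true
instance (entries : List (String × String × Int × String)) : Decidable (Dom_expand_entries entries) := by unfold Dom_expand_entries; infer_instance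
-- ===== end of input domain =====

-- B drops A's shared mutable chain-index counter: it expands each type's
-- sequences separately and attaches IDs by zipping against alphabet slices at
-- arithmetic offsets (objective: alternative decomposition, same cost).

def pvAlpha : List Char := "ABCDEFGHIJKLMNOPQRSTUVWXYZabcdefghijklmnopqrstuvwxyz".toList

-- ===== PORT A =====
-- A's three chain loops are textually identical; pvLoopA is that loop, applied
-- to each filtered entry list in turn with the threaded (chains, idx) state.
-- alphabet[idx] (a 1-char str) is indexing of the char list, exact under Pre_.
def pvLoopA (es : List (String × String × Int)) (st : List (String × String) × Int) :
    List (String × String) × Int :=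
  es.foldl (fun acc e =>
    (PySem.List.pyRange 0 e.2.2 1).foldl
      (fun acc2 _ =>
        (acc2.1 ++ [(String.singleton (PySem.List.pyGetD pvAlpha acc2.2 ' '), e.2.1)],
         acc2.2 + 1)) acc) st

def expand_entries (entries : List (String × String × Int × String)) :
    (List (String × String)) × (List (String × String)) × (List (String × String)) :=
  let rna_entries := entries.filterMap (fun e => if e.2.2.2 = "rna" then some (e.1, e.2.1, e.2.2.1) else none)
  let prot_entries := entries.filterMap (fun e => if e.2.2.2 = "protein" then some (e.1, e.2.1, e.2.2.1) else none)
  let dna_entries := entries.filterMap (fun e => if e.2.2.2 = "dna" then some (e.1, e.2.1, e.2.2.1) else none)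
  let r := pvLoopA rna_entries ([], 0)
  let p := pvLoopA prot_entries (([] : List (String × String)), r.2)
  let d := pvLoopA dna_entries (([] : List (String × String)), p.2)
  (r.1, p.1, d.1)

-- ===== PORT B =====
-- expanded(kind): the comprehension [s for _, s, n, t in entries if t == kind for _ in range(n)].
def pvExpanded (kind : String) (entries : List (String × String × Int × String)) : List String :=
  entries.flatMap (fun e =>
    if e.2.2.2 = kind then (PySem.List.pyRange 0 e.2.2.1 1).map (fun _ => e.2.1) else [])

-- zip(str, list) pairs each character (as a 1-char str in Python) with a sequence.
def pvZipIds (cs : List Char) (seqs : List String) : List (String × String) :=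
  List.zipWith (fun c s => (String.singleton c, s)) cs seqs

def expand_entries_alt (entries : List (String × String × Int × String)) :
    (List (String × String)) × (List (String × String)) × (List (String × String)) :=
  let rna := pvExpanded "rna" entries
  let prot := pvExpanded "protein" entries
  let dna := pvExpanded "dna" entries
  let r : Int := rna.length
  let p : Int := prot.length
  (pvZipIds pvAlpha rna,
   pvZipIds (PySem.List.slice pvAlpha (some r) none) prot,
   pvZipIds (PySem.List.slice pvAlpha (some (r + p)) none) dna)

-- ===== PRECONDITION & SPEC =====
-- Pre_ excludes exactly the inputs on which Python A raises IndexError: more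
-- than 52 chains in total (alphabet exhausted). Negative counts contribute 0.
def Pre_expand_entries (entries : List (String × String × Int × String)) : Prop :=
  ((entries.map (fun e =>
      if e.2.2.2 = "rna" ∨ e.2.2.2 = "protein" ∨ e.2.2.2 = "dna"
      then max e.2.2.1 0 else 0)).sum) ≤ 52
instance (entries : List (String × String × Int × String)) : Decidable (Pre_expand_entries entries) := by
  unfold Pre_expand_entries; infer_instance

def pvWitness_expand_entries : (List (String × String × Int × String)) :=
  [("h1", "ACG", 2, "rna"), ("h2", "MK", 1, "protein"), ("h3", "AT", 2, "dna")]

def Spec_expand_entries (entries : List (String × String × Int × String)) (out : (List (String × String)) × (List (String × String)) × (List (String × String))) : Prop := out = expand_entries_alt entries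
instance (entries : List (String × String × Int × String)) (out : (List (String × String)) × (List (String × String)) × (List (String × String))) : Decidable (Spec_expand_entries entries out) := by unfold Spec_expand_entries; infer_instance

-- ===== CLAIM (what is proved, stated in full; the proofs are below) =====
def Claim_equal_expand_entries : Prop := ∀ (entries : List (String × String × Int × String)), Dom_expand_entries entries → Pre_expand_entries entries → Spec_expand_entries entries (expand_entries entries)

-- ===== LEMMAS AND PROOFS =====

-- Labelled block of sequences starting at chain index idx (A's normal form).
def pvLabS (seqs : List String) (idx : Int) : List (String × String) :=
  (PySem.List.enumerate seqs idx).map (fun p =>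
    (String.singleton (PySem.List.pyGetD pvAlpha p.1 ' '), p.2))

lemma pvLabS_nil (idx : Int) : pvLabS [] idx = [] := by
  simp [pvLabS, PySem.List.enumerate_nil]

lemma pvLabS_cons (s : String) (seqs : List String) (idx : Int) :
    pvLabS (s :: seqs) idx =
      (String.singleton (PySem.List.pyGetD pvAlpha idx ' '), s) :: pvLabS seqs (idx + 1) := by
  simp [pvLabS, PySem.List.enumerate_cons]

lemma pvLabS_append (xs ys : List String) (idx : Int) :
    pvLabS (xs ++ ys) idx = pvLabS xs idx ++ pvLabS ys (idx + xs.length) := by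
  induction xs generalizing idx with
  | nil => simp [pvLabS_nil]
  | cons x xs ih =>
      simp only [List.cons_append, pvLabS_cons, ih, List.length_cons]
      push_cast; ring_nf

-- A's inner repetition loop appends a labelled block and advances idx by its length.
lemma pvInnerA (seq : String) (l : List Int) (cs : List (String × String)) (idx : Int) :
    l.foldl (fun acc2 (_ : Int) =>
        (acc2.1 ++ [(String.singleton (PySem.List.pyGetD pvAlpha acc2.2 ' '), seq)],
         acc2.2 + 1)) (cs, idx)
      = (cs ++ pvLabS (l.map (fun _ => seq)) idx, idx + l.length) := by
  induction l generalizing cs idx with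
  | nil => simp [pvLabS_nil]
  | cons a l ih =>
      simp only [List.foldl_cons, ih, List.map_cons, pvLabS_cons, List.length_cons,
        Prod.mk.injEq]
      constructor
      · simp
      · push_cast; ring

-- A's entry loop, characterised.
lemma pvLoopA_eq (es : List (String × String × Int)) (cs : List (String × String)) (idx : Int) :
    pvLoopA es (cs, idx)
      = (cs ++ pvLabS (es.flatMap (fun e => (PySem.List.pyRange 0 e.2.2 1).map (fun _ => e.2.1))) idx,
         idx + (es.flatMap (fun e => (PySem.List.pyRange 0 e.2.2 1).map (fun _ => e.2.1))).length) := by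
  induction es generalizing cs idx with
  | nil => simp [pvLoopA, pvLabS_nil]
  | cons e es ih =>
      simp only [pvLoopA, List.foldl_cons] at *
      rw [pvInnerA]
      rw [ih]
      simp only [List.flatMap_cons, pvLabS_append, List.length_map, List.length_append,
        Prod.mk.injEq]
      constructor
      · simp [List.append_assoc]
      · push_cast; ring

-- filtering entries by type then expanding = pvExpanded.
lemma pvFlat_filterMap (w : String) (entries : List (String × String × Int × String)) :
    ((entries.filterMap (fun e => if e.2.2.2 = w then some (e.1, e.2.1, e.2.2.1) else none)).flatMap
        (fun e => (PySem.List.pyRange 0 e.2.2 1).map (fun _ => e.2.1)))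
      = pvExpanded w entries := by
  induction entries with
  | nil => simp [pvExpanded]
  | cons e es ih =>
      by_cases h : e.2.2.2 = w <;>
        simp [pvExpanded, h, List.flatMap_cons] at * <;> simp [ih]

-- Within the alphabet, A's indexed labelling is B's zip against the dropped alphabet.
lemma pvLabS_eq_zip (seqs : List String) (k : Nat)
    (h : k + seqs.length ≤ 52) :
    pvLabS seqs (k : Int) = pvZipIds (pvAlpha.drop k) seqs := by
  induction seqs generalizing k with
  | nil => simp [pvLabS_nil, pvZipIds]
  | cons s seqs ih =>
      have hk : k < pvAlpha.length := by
        simp only [List.length_cons] at h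
        have : pvAlpha.length = 52 := by decide
        omega
      have h1 : PySem.List.pyGetD pvAlpha (k : Int) ' ' = pvAlpha[k] := by
        simp [PySem.List.pyGetD_natCast, List.getElem?_eq_getElem hk]
      have h2 : ((k : Int) + 1) = ((k + 1 : Nat) : Int) := by push_cast; ring
      rw [pvLabS_cons, h1, h2, ih (k + 1) (by simp only [List.length_cons] at h; omega),
        List.drop_eq_getElem_cons hk]
      simp only [pvZipIds, List.zipWith_cons_cons]

-- One cons step of pvExpanded's length, as an Int (negative counts give 0).
lemma pvExpLen (w : String) (e : String × String × Int × String)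
    (es : List (String × String × Int × String)) :
    (((pvExpanded w (e :: es)).length : Int))
      = (if e.2.2.2 = w then max e.2.2.1 0 else 0) + (pvExpanded w es).length := by
  by_cases h : e.2.2.2 = w <;>
    simp [pvExpanded, h, PySem.List.length_pyRange_one]

-- Under Pre_, the three expanded lists' total length is Pre_'s chain count.
lemma pvLen_sum (es : List (String × String × Int × String)) :
    (((pvExpanded "rna" es).length : Int) + ((pvExpanded "protein" es).length : Int)
        + ((pvExpanded "dna" es).length : Int))
      = (es.map (fun e =>
          if e.2.2.2 = "rna" ∨ e.2.2.2 = "protein" ∨ e.2.2.2 = "dna"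
          then max e.2.2.1 0 else 0)).sum := by
  induction es with
  | nil => simp [pvExpanded]
  | cons e es ih =>
      rw [List.map_cons, List.sum_cons, pvExpLen, pvExpLen, pvExpLen]
      by_cases ha : e.2.2.2 = "rna"
      · simp only [ha]; simp; omega
      · by_cases hb : e.2.2.2 = "protein"
        · simp only [hb]; simp; omega
        · by_cases hc : e.2.2.2 = "dna"
          · simp only [hc]; simp; omega
          · simp only [ha, hb, hc]; simp; omega

-- ===== VERDICT (by name: the statement is the Claim_ definition above) =====
theorem expand_entries_spec : Claim_equal_expand_entries := by
  intro entries _ hpre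
  unfold Spec_expand_entries expand_entries expand_entries_alt
  dsimp only
  rw [pvLoopA_eq, pvLoopA_eq, pvLoopA_eq]
  simp only [pvFlat_filterMap]
  have hlen : (pvExpanded "rna" entries).length + (pvExpanded "protein" entries).length
      + (pvExpanded "dna" entries).length ≤ 52 := by
    have := pvLen_sum entries
    unfold Pre_expand_entries at hpre
    omega
  have hr := pvLabS_eq_zip (pvExpanded "rna" entries) 0 (by omega)
  have hp := pvLabS_eq_zip (pvExpanded "protein" entries)
      (pvExpanded "rna" entries).length (by omega)
  have hd := pvLabS_eq_zip (pvExpanded "dna" entries)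
      ((pvExpanded "rna" entries).length + (pvExpanded "protein" entries).length) (by omega)
  refine Prod.ext ?_ (Prod.ext ?_ ?_) <;> dsimp only
  · simpa using hr
  · rw [show ((0 : Int) + (pvExpanded "rna" entries).length)
        = ((pvExpanded "rna" entries).length : Int) by ring, hp,
      PySem.List.slice_from_natCast]
    simp
  · rw [show ((0 : Int) + (pvExpanded "rna" entries).length + (pvExpanded "protein" entries).length)
        = (((pvExpanded "rna" entries).length + (pvExpanded "protein" entries).length : Nat) : Int)
        by push_cast; ring, hd]
    rw [show ((pvExpanded "rna" entries).length : Int) + (pvExpanded "protein" entries).length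
        = (((pvExpanded "rna" entries).length + (pvExpanded "protein" entries).length : Nat) : Int)
        by push_cast; ring, PySem.List.slice_from_natCast]
    simp
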